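-- pv_equiv track=rewrite | github.com/Kesendo/R-equals-C-Psi-squared | simulations/framework_archive.py | _k_to_indices
-- ===== SOURCE A (Python) =====
-- def _k_to_indices(k, N):
--     """Convert flat index k ∈ [0, 4^N) to N-tuple of (a,b) tuples."""
--     out = []
--     kk = k
--     for _ in range(N):
--         i = kk % 4
--         kk //= 4
--         # i ∈ {0,1,2,3}: I, X, Z, Y in some order; use (a, b) encoding
--         # We use: 0=(0,0), 1=(1,0), 2=(0,1), 3=(1,1)
--         out.append((i & 1, (i >> 1) & 1))
--     return tuple(reversed(out))
-- ===== SOURCE B (Python) =====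
-- def _k_to_indices(k, N):
--     """Reduce k once modulo 4**N, then read the result's binary expansion as a
--     zero-padded bit string: base-4 digit i (MSD-first) is the bit pair
--     (bits[2*i+1], bits[2*i]); no per-digit division loop, no reverse."""
--     if N <= 0:
--         return ()
--     bits = list(map(int, bin(k % 4 ** N)[2:].zfill(2 * N)))
--     return tuple((bits[2 * i + 1], bits[2 * i]) for i in range(N))
-- ===== Notes on version B (the rewrite author's own statement) =====
-- stated objective: alternative
-- what changed: B replaces A's divide-by-4 peel loop plus final reverse with one modular reduction r = k % 4**N followed by reading the digit pairs straight off the zero-padded binary string bin(r): pair i is (bits[2*i+1], bits[2*i]), produced MSD-first in a single forward pass with no division loop.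
import Mathlib
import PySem

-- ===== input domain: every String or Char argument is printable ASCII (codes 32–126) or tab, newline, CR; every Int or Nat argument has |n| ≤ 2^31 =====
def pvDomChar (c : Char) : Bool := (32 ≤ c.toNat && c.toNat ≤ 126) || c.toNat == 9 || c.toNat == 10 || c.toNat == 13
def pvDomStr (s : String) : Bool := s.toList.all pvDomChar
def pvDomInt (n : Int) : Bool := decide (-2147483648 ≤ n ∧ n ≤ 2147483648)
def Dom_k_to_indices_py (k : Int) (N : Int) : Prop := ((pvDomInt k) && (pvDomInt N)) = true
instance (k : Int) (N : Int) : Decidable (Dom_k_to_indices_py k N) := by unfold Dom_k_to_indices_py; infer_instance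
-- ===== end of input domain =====

-- B reduces k once modulo 4**N and reads the digit pairs off the zero-padded
-- binary expansion of the residue, instead of A's divide-by-4 peel loop plus reverse.


-- ===== PORT A =====
-- A's loop body: i = kk % 4; kk //= 4; out.append((i & 1, (i >> 1) & 1)); result reversed at the end
def pvALoop : Int → Nat → List (Int × Int) → List (Int × Int)
  | _, 0, out => out
  | kk, n + 1, out =>
      let i := PySem.Int.mod kk 4
      pvALoop (PySem.Int.floordiv kk 4) n (out ++ [(PySem.Int.band i 1, PySem.Int.band (i >>> 1) 1)])

def k_to_indices_py (k : Int) (N : Int) : List (Int × Int) :=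
  (pvALoop k N.toNat []).reverse

-- ===== PORT B =====
-- bin(r)[2:] for r > 0: MSB-first binary digit characters (hand port of the builtin, exact on Nat)
def pvBinGo (n : Nat) : List Char :=
  if h : n = 0 then []
  else pvBinGo (n / 2) ++ [if n % 2 = 1 then '1' else '0']
  decreasing_by exact Nat.div_lt_self (Nat.pos_of_ne_zero h) (by omega)

-- bin(r)[2:] for r ≥ 0 (bin(0)[2:] = "0")
def pvBin (n : Nat) : List Char := if n = 0 then ['0'] else pvBinGo n

-- int(c) for the digit characters '0'/'1' that occur here (exact on them)
def pvToDigit (c : Char) : Int := ((c.toNat - 48 : Nat) : Int)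

-- B: s = bin(k % 4**N)[2:].zfill(2*N); bits = list(map(int, s));
--    tuple((bits[2*i+1], bits[2*i]) for i in range(N))
-- (k % 4**N ≥ 0, so .toNat is exact; the indices are always in range, so pyGetD _ _ 0 is exact)
def k_to_indices_py_alt (k : Int) (N : Int) : List (Int × Int) :=
  if N ≤ 0 then []
  else
    let s := pvBin (PySem.Int.mod k ((4 : Int) ^ N.toNat)).toNat
    let bits := (List.replicate (2 * N.toNat - s.length) '0' ++ s).map pvToDigit
    (PySem.List.pyRange 0 N 1).map (fun i =>
      (PySem.List.pyGetD bits (2 * i + 1) 0, PySem.List.pyGetD bits (2 * i) 0))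

-- ===== PRECONDITION & SPEC =====
def Spec_k_to_indices_py (k : Int) (N : Int) (out : List (Int × Int)) : Prop := out = k_to_indices_py_alt k N
instance (k : Int) (N : Int) (out : List (Int × Int)) : Decidable (Spec_k_to_indices_py k N out) := by unfold Spec_k_to_indices_py; infer_instance

-- ===== CLAIM (what is proved, stated in full; the proofs are below) =====
def Claim_equal_k_to_indices_py : Prop := ∀ (k : Int) (N : Int), Dom_k_to_indices_py k N → Spec_k_to_indices_py k N (k_to_indices_py k N)

-- ===== LEMMAS AND PROOFS =====

-- A's accumulator only receives appends
theorem pvALoop_acc (kk : Int) (n : Nat) (out : List (Int × Int)) :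
    pvALoop kk n out = out ++ pvALoop kk n [] := by
  induction n generalizing kk out with
  | zero => simp [pvALoop]
  | succ n ih =>
      simp only [pvALoop]
      conv_lhs => rw [ih]
      conv_rhs => rw [ih]
      simp

-- A's digit pair of a quotient, as a function
def pvPairA (kk : Int) : Int × Int :=
  (PySem.Int.band (PySem.Int.mod kk 4) 1, PySem.Int.band (PySem.Int.mod kk 4 >>> 1) 1)

-- the bit twiddling rewritten as % 2 and // 2 of the mod-4 residue
theorem pvPair_eq (kk : Int) :
    pvPairA kk
    = (PySem.Int.mod (PySem.Int.mod kk 4) 2, PySem.Int.floordiv (PySem.Int.mod kk 4) 2) := by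
  have h0 : (0 : Int) ≤ PySem.Int.mod kk 4 := PySem.Int.mod_nonneg kk (by norm_num)
  have h4 : PySem.Int.mod kk 4 < 4 := PySem.Int.mod_lt kk (by norm_num)
  have : PySem.Int.mod kk 4 = 0 ∨ PySem.Int.mod kk 4 = 1 ∨
         PySem.Int.mod kk 4 = 2 ∨ PySem.Int.mod kk 4 = 3 := by omega
  unfold pvPairA
  rcases this with h | h | h | h <;> rw [h] <;> decide

-- the reversed LSB-first peel of n digits, positionally: element i is the digit at weight 4^(n-1-i)
theorem pvPeel_eq_positional (n : Nat) : ∀ k : Int,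
    (pvALoop k n []).reverse
      = (List.range n).map (fun i => pvPairA (PySem.Int.floordiv k ((4 : Int) ^ (n - 1 - i)))) := by
  induction n with
  | zero => intro k; simp [pvALoop]
  | succ m ih =>
      intro k
      have hstep : pvALoop k (m + 1) []
          = pvPairA k :: pvALoop (PySem.Int.floordiv k 4) m [] := by
        simp only [pvALoop]; rw [pvALoop_acc]; simp [pvPairA]
      rw [hstep, List.reverse_cons, ih (PySem.Int.floordiv k 4), List.range_succ, List.map_append]
      congr 1
      · refine List.map_congr_left ?_
        intro i hi
        have him : i < m := List.mem_range.mp hi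
        have hdd : PySem.Int.floordiv (PySem.Int.floordiv k 4) ((4 : Int) ^ (m - 1 - i))
            = PySem.Int.floordiv k ((4 : Int) ^ (m + 1 - 1 - i)) := by
          have h4 : (0 : Int) < 4 := by norm_num
          have hp : (0 : Int) < (4 : Int) ^ (m - 1 - i) := by positivity
          have hp1 : (0 : Int) < (4 : Int) ^ (m + 1 - 1 - i) := by positivity
          rw [PySem.Int.floordiv_eq_ediv_of_pos hp, PySem.Int.floordiv_eq_ediv_of_pos h4,
              PySem.Int.floordiv_eq_ediv_of_pos hp1,
              Int.ediv_ediv_of_nonneg (le_of_lt h4)]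
          congr 1
          rw [show m + 1 - 1 - i = (m - 1 - i) + 1 by omega, pow_succ, mul_comm]
        rw [hdd]
      · simp only [List.map_cons, List.map_nil]
        rw [show m + 1 - 1 - m = 0 by omega]
        norm_num

-- indexing a map over List.range at a nonnegative in-range Int index
theorem pvGetD_map_range (f : Nat → Int) (n : Nat) (i : Int) (d : Int)
    (h0 : 0 ≤ i) (h : i.toNat < n) :
    PySem.List.pyGetD ((List.range n).map f) i d = f i.toNat := by
  simp [PySem.List.pyGetD, PySem.List.pyGet?, PySem.List.pyIdx?, h0]
  rw [if_pos (show i < (n : Int) by omega)]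
  simp [List.getElem?_range h]

-- the bit character of R at MSB-first position j of an L-bit window
def pvBitChar (R L j : Nat) : Char := if R / 2 ^ (L - 1 - j) % 2 = 1 then '1' else '0'

theorem pvBinGo_zero : pvBinGo 0 = [] := by
  rw [pvBinGo]
  simp

theorem pvBinGo_pos {n : Nat} (h : 0 < n) :
    pvBinGo n = pvBinGo (n / 2) ++ [if n % 2 = 1 then '1' else '0'] := by
  conv_lhs => rw [pvBinGo]
  rw [dif_neg (by omega)]

theorem pvBinGo_len (L : Nat) : ∀ R : Nat, R < 2 ^ L → (pvBinGo R).length ≤ L := by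
  induction L with
  | zero =>
      intro R h
      have : R = 0 := by simpa using h
      subst this
      rw [pvBinGo_zero]; simp
  | succ L ih =>
      intro R h
      by_cases hR : R = 0
      · subst hR; rw [pvBinGo_zero]; simp
      · rw [pvBinGo_pos (Nat.pos_of_ne_zero hR)]
        have h2 : 2 ^ (L + 1) = 2 * 2 ^ L := by ring
        have := ih (R / 2) (by omega)
        simp only [List.length_append, List.length_cons, List.length_nil]
        omega

-- zero-padding bin(R) to an L-bit window gives the positional MSB-first bit characters
theorem pvBinGo_pad (L : Nat) : ∀ R : Nat, 0 < R → R < 2 ^ L →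
    List.replicate (L - (pvBinGo R).length) '0' ++ pvBinGo R
      = (List.range L).map (pvBitChar R L) := by
  induction L with
  | zero =>
      intro R h1 h2
      simp at h2
      omega
  | succ L ih =>
      intro R h1 h2
      have h2' : 2 ^ (L + 1) = 2 * 2 ^ L := by ring
      rw [pvBinGo_pos h1, List.range_succ, List.map_append]
      by_cases hR : R / 2 = 0
      · have hR1 : R = 1 := by omega
        subst hR1
        rw [pvBinGo_zero]
        simp only [List.nil_append, List.length_cons, List.length_nil,
          List.map_cons, List.map_nil]
        have hhead : (List.range L).map (pvBitChar 1 (L + 1)) = List.replicate L '0' := by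
          have hc : ∀ j ∈ List.range L, pvBitChar 1 (L + 1) j = '0' := by
            intro j hj
            have hjL : j < L := List.mem_range.mp hj
            unfold pvBitChar
            rw [show L + 1 - 1 - j = L - j by omega,
                Nat.div_eq_of_lt (Nat.one_lt_two_pow (by omega))]
            norm_num
          rw [List.map_congr_left hc, List.map_const', List.length_range]
        have htail : pvBitChar 1 (L + 1) L = '1' := by
          unfold pvBitChar
          rw [show L + 1 - 1 - L = 0 by omega]
          norm_num
        rw [hhead, htail]
        norm_num
      · have hpos : 0 < R / 2 := Nat.pos_of_ne_zero hR
        have hlt : R / 2 < 2 ^ L := by omega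
        have hlen := pvBinGo_len L (R / 2) hlt
        have hL : L + 1 - (pvBinGo (R / 2) ++ [if R % 2 = 1 then '1' else '0']).length
            = L - (pvBinGo (R / 2)).length := by
          simp only [List.length_append, List.length_cons, List.length_nil]
          omega
        rw [hL, ← List.append_assoc, ih (R / 2) hpos hlt]
        congr 1
        · refine List.map_congr_left ?_
          intro j hj
          have hjL : j < L := List.mem_range.mp hj
          unfold pvBitChar
          have hdiv : R / 2 / 2 ^ (L - 1 - j) = R / 2 ^ (L + 1 - 1 - j) := by
            rw [Nat.div_div_eq_div_mul]
            congr 1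
            rw [show L + 1 - 1 - j = (L - 1 - j) + 1 by omega, pow_succ, mul_comm]
          rw [hdiv]
        · unfold pvBitChar
          simp only [List.map_cons, List.map_nil]
          rw [show L + 1 - 1 - L = 0 by omega]
          simp

theorem pvBin_pad (L R : Nat) (hL : 1 ≤ L) (h : R < 2 ^ L) :
    List.replicate (L - (pvBin R).length) '0' ++ pvBin R
      = (List.range L).map (pvBitChar R L) := by
  by_cases hR : R = 0
  · subst hR
    have hb : pvBin 0 = ['0'] := by rw [pvBin]; simp
    have hc : ∀ j ∈ List.range L, pvBitChar 0 L j = '0' := by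
      intro j _
      unfold pvBitChar
      simp
    rw [hb, List.map_congr_left hc, List.map_const', List.length_range]
    simp only [List.length_cons, List.length_nil]
    rw [show ['0'] = List.replicate 1 '0' from rfl, ← List.replicate_add]
    congr 1
    omega
  · rw [pvBin, if_neg hR]
    exact pvBinGo_pad L R (Nat.pos_of_ne_zero hR) h

-- int of a bit character is the bit
theorem pvToDigit_bitChar (R L j : Nat) :
    pvToDigit (pvBitChar R L j) = ((R / 2 ^ (L - 1 - j) % 2 : Nat) : Int) := by
  unfold pvToDigit pvBitChar
  rcases Nat.mod_two_eq_zero_or_one (R / 2 ^ (L - 1 - j)) with h | h <;> rw [h] <;> decide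

-- A's base-4 digit of k at weight 4^m equals the digit of (k % 4^n), for m < n
theorem pvDigit_eq (k : Int) (n m : Nat) (hm : m < n) :
    PySem.Int.mod (PySem.Int.floordiv k ((4 : Int) ^ m)) 4
      = (((PySem.Int.mod k ((4 : Int) ^ n)).toNat / 4 ^ m % 4 : Nat) : Int) := by
  have hpn : (0 : Int) < (4 : Int) ^ n := by positivity
  have hpm : (0 : Int) < (4 : Int) ^ m := by positivity
  set r := PySem.Int.mod k ((4 : Int) ^ n) with hr
  have hr0 : 0 ≤ r := PySem.Int.mod_nonneg k (by positivity)
  have hk : PySem.Int.floordiv k ((4 : Int) ^ n) * (4 : Int) ^ n + r = k :=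
    PySem.Int.floordiv_mul_add_mod k _
  set q := PySem.Int.floordiv k ((4 : Int) ^ n) with hq
  have hsplit : (4 : Int) ^ n = (4 : Int) ^ (n - m - 1) * 4 * (4 : Int) ^ m := by
    rw [mul_assoc, ← pow_succ', ← pow_add]
    congr 1
    omega
  have hkk : k = r + q * ((4 : Int) ^ (n - m - 1) * 4) * (4 : Int) ^ m := by
    rw [← hk, hsplit]; ring
  rw [PySem.Int.floordiv_eq_ediv_of_pos hpm, PySem.Int.mod_eq_emod_of_pos (by norm_num)]
  rw [hkk, Int.add_mul_ediv_right _ _ (ne_of_gt hpm)]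
  have hmod4 : ∀ a b : Int, (a + b * 4) % 4 = a % 4 := fun a b => by omega
  rw [show r / (4 : Int) ^ m + q * ((4 : Int) ^ (n - m - 1) * 4)
        = r / (4 : Int) ^ m + q * (4 : Int) ^ (n - m - 1) * 4 by ring,
      hmod4]
  have hrn : r = ((r.toNat : Nat) : Int) := (Int.toNat_of_nonneg hr0).symm
  rw [hrn]
  norm_cast

-- the pointwise identity: A's digit pair at weight 4^(n-1-i) is B's bit pair
theorem pvPoint (k : Int) (n iN : Nat) (hi : iN < n) :
    pvPairA (PySem.Int.floordiv k ((4 : Int) ^ (n - 1 - iN)))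
      = ((((PySem.Int.mod k ((4 : Int) ^ n)).toNat / 2 ^ (2 * n - 1 - (2 * iN + 1)) % 2 : Nat) : Int),
         (((PySem.Int.mod k ((4 : Int) ^ n)).toNat / 2 ^ (2 * n - 1 - 2 * iN) % 2 : Nat) : Int)) := by
  set m := n - 1 - iN with hm
  set R := (PySem.Int.mod k ((4 : Int) ^ n)).toNat with hR
  rw [pvPair_eq, pvDigit_eq k n m (by omega)]
  have h4 : (4 : Nat) ^ m = 2 ^ (2 * m) := by rw [pow_mul]; norm_num
  have c1 : PySem.Int.mod ((R / 4 ^ m % 4 : Nat) : Int) 2 = ((R / 4 ^ m % 4 % 2 : Nat) : Int) := by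
    rw [PySem.Int.mod_eq_emod_of_pos (by norm_num)]; norm_cast
  have c2 : PySem.Int.floordiv ((R / 4 ^ m % 4 : Nat) : Int) 2
      = ((R / 4 ^ m % 4 / 2 : Nat) : Int) := by
    rw [PySem.Int.floordiv_eq_ediv_of_pos (by norm_num)]; norm_cast
  rw [c1, c2]
  have e1 : R / 4 ^ m % 4 % 2 = R / 2 ^ (2 * n - 1 - (2 * iN + 1)) % 2 := by
    rw [Nat.mod_mod_of_dvd _ (by norm_num : 2 ∣ 4), h4,
        show 2 * n - 1 - (2 * iN + 1) = 2 * m by omega]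
  have e2 : R / 4 ^ m % 4 / 2 = R / 2 ^ (2 * n - 1 - 2 * iN) % 2 := by
    have hx : R / 4 ^ m % 4 / 2 = R / 4 ^ m / 2 % 2 := by omega
    rw [hx, h4, Nat.div_div_eq_div_mul, ← pow_succ,
        show 2 * m + 1 = 2 * n - 1 - 2 * iN by omega]
  rw [e1, e2]

-- ===== VERDICT (by name: the statement is the Claim_ definition above) =====
theorem k_to_indices_py_spec : Claim_equal_k_to_indices_py := by
  intro k N _
  unfold Spec_k_to_indices_py k_to_indices_py k_to_indices_py_alt
  by_cases hN : N ≤ 0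
  · rw [if_pos hN]
    have h1 : N.toNat = 0 := by omega
    rw [h1]
    simp [pvALoop]
  · rw [if_neg hN]
    rw [not_le] at hN
    set n := N.toNat with hn
    have hn1 : 1 ≤ n := by omega
    set R := (PySem.Int.mod k ((4 : Int) ^ n)).toNat with hR
    have hrlt : PySem.Int.mod k ((4 : Int) ^ n) < (4 : Int) ^ n :=
      PySem.Int.mod_lt k (by positivity)
    have hr0 : 0 ≤ PySem.Int.mod k ((4 : Int) ^ n) :=
      PySem.Int.mod_nonneg k (by positivity)
    have hRlt2 : R < 2 ^ (2 * n) := by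
      have hc : ((4 : Int) ^ n) = ((4 ^ n : Nat) : Int) := by push_cast; ring
      have : R < 4 ^ n := by omega
      calc R < 4 ^ n := this
        _ = 2 ^ (2 * n) := by rw [pow_mul]; norm_num
    simp only []
    rw [pvBin_pad (2 * n) R (by omega) hRlt2, List.map_map,
        PySem.List.pyRange_one]
    have hsub : ((N - 0).toNat) = n := by omega
    rw [hsub, List.map_map]
    rw [pvPeel_eq_positional n k]
    refine List.map_congr_left ?_
    intro iN hiN
    have hi : iN < n := List.mem_range.mp hiN
    simp only [Function.comp_def]
    rw [pvGetD_map_range _ _ _ _ (by omega) (by omega : (2 * (0 + (iN : Int)) + 1).toNat < 2 * n),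
        pvGetD_map_range _ _ _ _ (by omega) (by omega : (2 * (0 + (iN : Int))).toNat < 2 * n)]
    rw [show (2 * (0 + (iN : Int)) + 1).toNat = 2 * iN + 1 by omega,
        show (2 * (0 + (iN : Int))).toNat = 2 * iN by omega]
    rw [pvToDigit_bitChar, pvToDigit_bitChar]
    exact pvPoint k n iN hi
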